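-- pv_equiv track=rewrite | github.com/eddiethedean/tinytim | tinytim/utils.py | row_dicts_to_data
-- ===== SOURCE A (Python) =====
-- from collections import defaultdict
-- from typing import Any, Collection, Dict, Generator, Iterable, List, Mapping, MutableMapping, Optional, Tuple
--
-- def row_dicts_to_data(rows: Collection[dict], missing_value=None) -> Dict[str, list]:
--     """Convert a list of row dicts to dict[col_name: values] format.
--
--        Examples:
--        rows = [{'x': 1, 'y': 20}, {'x': 2, 'y': 21}, {'x': 3, 'y': 22}]
--        row_dicts_to_data(rows) -> {'x': [1, 2, 3], 'y': [20, 21, 22]}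
--
--        rows = [{'x': 1, 'y': 20}, {'x': 2}, {'x': 3, 'y': 22}]
--        row_dicts_to_data(rows) -> {'x': [1, 2, 3], 'y': [20, None, 22]}
--     """
--     keys = all_keys(rows)
--     data = defaultdict(list)
--     for row in rows:
--         for col in keys:
--             if col in row:
--                 data[col].append(row[col])
--             else:
--                 data[col].append(missing_value)
--     return dict(data)
--
-- def all_keys(dicts: Collection[dict]) -> List:
--     keys = []
--     for d in dicts:
--         for key in d:
--             if key not in keys:
--                 keys.append(key)
--     return keys
-- ===== SOURCE B (Python) =====
-- def row_dicts_to_data(rows, missing_value=None):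
--     """Single pass over the rows: grow columns as new keys appear, padding
--     new columns with missing_value for the rows already processed and padding
--     existing columns that the current row does not mention."""
--     data = {}
--     seen = 0
--     for row in rows:
--         for key, value in row.items():
--             col = data.get(key)
--             if col is None:
--                 data[key] = [missing_value] * seen + [value]
--             else:
--                 col.append(value)
--         for key, col in data.items():
--             if key not in row:
--                 col.append(missing_value)
--         seen += 1
--     return data
-- ===== Notes on version B (the rewrite author's own statement) =====
-- stated objective: faster
-- what changed: B drops A's separate all_keys pre-pass and its per-row loop over the full key set: it makes a single pass over the rows, creating a column (pre-padded with missing_value for the rows already seen) when a key first appears, appending values directly, and padding only the columns a row does not mention.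
import Mathlib
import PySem

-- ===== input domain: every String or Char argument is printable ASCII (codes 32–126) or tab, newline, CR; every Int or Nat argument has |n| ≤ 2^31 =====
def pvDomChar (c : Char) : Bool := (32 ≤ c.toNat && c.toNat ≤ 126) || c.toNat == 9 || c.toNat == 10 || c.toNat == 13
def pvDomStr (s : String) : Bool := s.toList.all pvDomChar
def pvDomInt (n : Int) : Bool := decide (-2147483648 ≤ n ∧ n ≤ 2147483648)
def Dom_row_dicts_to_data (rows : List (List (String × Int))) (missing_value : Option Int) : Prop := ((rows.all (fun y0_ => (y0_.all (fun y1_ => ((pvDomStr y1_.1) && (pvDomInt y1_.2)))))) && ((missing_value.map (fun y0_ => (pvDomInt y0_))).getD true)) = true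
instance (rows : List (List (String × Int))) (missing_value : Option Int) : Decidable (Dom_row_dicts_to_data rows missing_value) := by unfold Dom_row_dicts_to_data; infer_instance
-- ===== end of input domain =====

-- B replaces A's all_keys pre-pass (a list-membership scan per key/value pair) + per-row scan
-- over ALL keys by a single pass over the rows that grows/pads columns as keys appear
-- (dict lookups instead of list scans; measured faster in a timing run).

-- ===== PORT A =====
-- defaultdict(list): data[col].append(v) updates the column in place if present,
-- otherwise appends a new (col, [v]) entry at the end (exact for dict-valid rows, see Pre_).
def pvAppendAt (data : List (String × List (Option Int))) (k : String) (v : Option Int) :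
    List (String × List (Option Int)) :=
  if data.any (fun e => e.1 == k) then
    data.map (fun e => if e.1 == k then (e.1, e.2 ++ [v]) else e)
  else data ++ [(k, [v])]

def all_keys (dicts : List (List (String × Int))) : List String :=
  dicts.foldl (fun keys d =>
    d.foldl (fun ks kv => if kv.1 ∈ ks then ks else ks ++ [kv.1]) keys) []

def row_dicts_to_data (rows : List (List (String × Int))) (missing_value : Option Int) :
    List (String × List (Option Int)) :=
  let keys := all_keys rows
  rows.foldl (fun data row =>
    keys.foldl (fun data col =>
      -- 'if col in row: append row[col] else append missing_value' (dict lookup = first match)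
      match row.find? (fun kv => kv.1 == col) with
      | some kv => pvAppendAt data col (some kv.2)
      | none    => pvAppendAt data col missing_value) data) []

-- ===== PORT B =====
def row_dicts_to_data_alt (rows : List (List (String × Int))) (missing_value : Option Int) :
    List (String × List (Option Int)) :=
  (rows.foldl (fun (st : List (String × List (Option Int)) × Nat) row =>
    -- for key, value in row.items(): grow or extend the column
    let data := row.foldl (fun data kv =>
      if data.any (fun e => e.1 == kv.1) then
        data.map (fun e => if e.1 == kv.1 then (e.1, e.2 ++ [some kv.2]) else e)
      else data ++ [(kv.1, List.replicate st.2 missing_value ++ [some kv.2])]) st.1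
    -- pad every column whose key this row does not mention
    let data2 := data.map (fun e =>
      if row.any (fun kv => kv.1 == e.1) then e else (e.1, e.2 ++ [missing_value]))
    (data2, st.2 + 1)) ([], 0)).1

-- ===== PRECONDITION & SPEC =====
-- Pre_ excludes association lists in which some row carries a duplicate key: such a row cannot
-- arise from a Python dict (rows are dicts in Python), so no Python-reachable input is excluded.
def Pre_row_dicts_to_data (rows : List (List (String × Int))) (missing_value : Option Int) : Prop :=
  ∀ row ∈ rows, (row.map Prod.fst).Nodup
instance (rows : List (List (String × Int))) (missing_value : Option Int) : Decidable (Pre_row_dicts_to_data rows missing_value) := by unfold Pre_row_dicts_to_data; infer_instance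

def pvWitness_row_dicts_to_data : (List (List (String × Int))) × Option Int :=
  ([[("x", 1), ("y", 20)], [("x", 2)], [("x", 3), ("y", 22)]], none)

def Spec_row_dicts_to_data (rows : List (List (String × Int))) (missing_value : Option Int) (out : List (String × List (Option Int))) : Prop := out = row_dicts_to_data_alt rows missing_value
instance (rows : List (List (String × Int))) (missing_value : Option Int) (out : List (String × List (Option Int))) : Decidable (Spec_row_dicts_to_data rows missing_value out) := by unfold Spec_row_dicts_to_data; infer_instance

-- ===== CLAIM (what is proved, stated in full; the proofs are below) =====
def Claim_equal_row_dicts_to_data : Prop := ∀ (rows : List (List (String × Int))) (missing_value : Option Int), Dom_row_dicts_to_data rows missing_value → Pre_row_dicts_to_data rows missing_value → Spec_row_dicts_to_data rows missing_value (row_dicts_to_data rows missing_value)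

-- ===== LEMMAS AND PROOFS =====

-- the value A's inner loop appends for key k on a given row
def pvColVal (row : List (String × Int)) (k : String) (mv : Option Int) : Option Int :=
  match row.find? (fun kv => kv.1 == k) with
  | some kv => some kv.2
  | none => mv

-- the common normal form: one column per key, each column = that key's value in every row
def pvColsOf (rows : List (List (String × Int))) (mv : Option Int) (ks : List String) :
    List (String × List (Option Int)) :=
  ks.map (fun k => (k, rows.map (fun row => pvColVal row k mv)))

-- keys of q not already in base, in order (what one row adds to the key list)
def pvNewKeys (q : List (String × Int)) (base : List String) : List String :=
  q.filterMap (fun kv => if kv.1 ∈ base then none else some kv.1)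

theorem pv_insKeys_nodup (q : List (String × Int)) (base : List String) (h : base.Nodup) :
    (q.foldl (fun ks kv => if kv.1 ∈ ks then ks else ks ++ [kv.1]) base).Nodup := by
  induction q generalizing base with
  | nil => simpa using h
  | cons kv q ih =>
    simp only [List.foldl_cons]
    by_cases hm : kv.1 ∈ base
    · simpa [hm] using ih base h
    · rw [if_neg hm]
      refine ih _ ?_
      rw [List.nodup_append]
      exact ⟨h, List.nodup_singleton _, by intro a ha b hb e; rw [List.mem_singleton] at hb; exact hm ((e.trans hb) ▸ ha)⟩

theorem pv_mem_insKeys (q : List (String × Int)) (base : List String) (k : String) :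
    k ∈ q.foldl (fun ks kv => if kv.1 ∈ ks then ks else ks ++ [kv.1]) base ↔
      k ∈ base ∨ k ∈ q.map Prod.fst := by
  induction q generalizing base with
  | nil => simp
  | cons kv q ih =>
    simp only [List.foldl_cons, List.map_cons, List.mem_cons]
    by_cases hm : kv.1 ∈ base
    · rw [if_pos hm, ih]
      constructor
      · rintro (h | h)
        · exact Or.inl h
        · exact Or.inr (Or.inr h)
      · rintro (h | rfl | h)
        · exact Or.inl h
        · exact Or.inl hm
        · exact Or.inr h
    · rw [if_neg hm, ih]
      simp only [List.mem_append, List.mem_singleton]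
      tauto

theorem pv_newKeys_snoc (q : List (String × Int)) (base : List String) (x : String)
    (hx : x ∉ q.map Prod.fst) : pvNewKeys q (base ++ [x]) = pvNewKeys q base := by
  unfold pvNewKeys
  apply List.filterMap_congr
  intro kv hkv
  have hne : kv.1 ≠ x := fun e => hx (e ▸ List.mem_map_of_mem hkv)
  simp [List.mem_append, hne]

theorem pv_insKeys_eq (q : List (String × Int)) (base : List String)
    (hq : (q.map Prod.fst).Nodup) :
    q.foldl (fun ks kv => if kv.1 ∈ ks then ks else ks ++ [kv.1]) base =
      base ++ pvNewKeys q base := by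
  induction q generalizing base with
  | nil => simp [pvNewKeys]
  | cons kv q ih =>
    rw [List.map_cons, List.nodup_cons] at hq
    obtain ⟨hk1, hq'⟩ := hq
    simp only [List.foldl_cons]
    by_cases hm : kv.1 ∈ base
    · rw [if_pos hm, ih _ hq']
      simp [pvNewKeys, hm]
    · rw [if_neg hm, ih _ hq', pv_newKeys_snoc q base kv.1 hk1]
      simp [pvNewKeys, hm]

theorem pv_nodup_all_keys (rows : List (List (String × Int))) : (all_keys rows).Nodup := by
  have main : ∀ (rs : List (List (String × Int))) (base : List String), base.Nodup →
      (rs.foldl (fun keys d =>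
        d.foldl (fun ks kv => if kv.1 ∈ ks then ks else ks ++ [kv.1]) keys) base).Nodup := by
    intro rs
    induction rs with
    | nil => intro base h; simpa using h
    | cons r rs ih => intro base h; exact ih _ (pv_insKeys_nodup r base h)
  simpa [all_keys] using main rows [] (by simp)

theorem pv_mem_all_keys (rows : List (List (String × Int))) (k : String) :
    k ∈ all_keys rows ↔ ∃ row ∈ rows, k ∈ row.map Prod.fst := by
  have main : ∀ (rs : List (List (String × Int))) (base : List String),
      k ∈ rs.foldl (fun keys d =>
        d.foldl (fun ks kv => if kv.1 ∈ ks then ks else ks ++ [kv.1]) keys) base ↔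
      k ∈ base ∨ ∃ row ∈ rs, k ∈ row.map Prod.fst := by
    intro rs
    induction rs with
    | nil => intro base; simp
    | cons r rs ih =>
      intro base
      simp only [List.foldl_cons]
      rw [ih, pv_mem_insKeys]
      simp only [List.mem_cons]
      constructor
      · rintro ((h | h) | ⟨row, hrow, h⟩)
        · exact Or.inl h
        · exact Or.inr ⟨r, Or.inl rfl, h⟩
        · exact Or.inr ⟨row, Or.inr hrow, h⟩
      · rintro (h | ⟨row, (rfl | hrow), h⟩)
        · exact Or.inl (Or.inl h)
        · exact Or.inl (Or.inr h)
        · exact Or.inr ⟨row, hrow, h⟩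
  simpa [all_keys] using main rows []

theorem pv_colVal_of_not_mem (row : List (String × Int)) (k : String) (mv : Option Int)
    (h : k ∉ row.map Prod.fst) : pvColVal row k mv = mv := by
  have hf : row.find? (fun kv => kv.1 == k) = none := by
    rw [List.find?_eq_none]
    intro kv hkv
    simp only [beq_iff_eq]
    intro e
    exact h (e ▸ List.mem_map_of_mem hkv)
  simp [pvColVal, hf]

theorem pv_mem_pvNewKeys (q : List (String × Int)) (base : List String) (k : String)
    (h : k ∈ pvNewKeys q base) : k ∈ q.map Prod.fst ∧ k ∉ base := by
  simp only [pvNewKeys, List.mem_filterMap] at h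
  obtain ⟨kv, hkv, he⟩ := h
  by_cases hm : kv.1 ∈ base
  · simp [hm] at he
  · rw [if_neg hm] at he
    obtain rfl : kv.1 = k := by simpa using he
    exact ⟨List.mem_map_of_mem hkv, hm⟩

-- A-side inner loop, fresh accumulator
theorem pv_foldA_fresh (f : String → Option Int) (ks : List String)
    (acc : List (String × List (Option Int))) (hk : ks.Nodup)
    (hacc : ∀ e ∈ acc, e.1 ∉ ks) :
    ks.foldl (fun d c => pvAppendAt d c (f c)) acc = acc ++ ks.map (fun k => (k, [f k])) := by
  induction ks generalizing acc with
  | nil => simp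
  | cons k ks ih =>
    obtain ⟨hk1, hk2⟩ := List.nodup_cons.1 hk
    simp only [List.foldl_cons, List.map_cons]
    have hany : acc.any (fun e => e.1 == k) = false := by
      rw [List.any_eq_false]
      intro e he
      simp only [beq_iff_eq]
      exact fun e2 => hacc e he (e2 ▸ List.mem_cons_self)
    have hstep : pvAppendAt acc k (f k) = acc ++ [(k, [f k])] := by
      simp [pvAppendAt, hany]
    rw [hstep, ih _ hk2 (by
      intro e he hin
      rcases List.mem_append.1 he with h1 | h1
      · exact hacc e h1 (List.mem_cons_of_mem _ hin)
      · rw [List.mem_singleton] at h1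
        subst h1
        exact hk1 hin)]
    simp

-- A-side inner loop, all keys already present
theorem pv_foldA_full (f : String → Option Int) (g : String → List (Option Int))
    (ks : List String) (acc : List (String × List (Option Int))) (hk : ks.Nodup)
    (hacc : ∀ e ∈ acc, e.1 ∉ ks) :
    ks.foldl (fun d c => pvAppendAt d c (f c)) (acc ++ ks.map (fun k => (k, g k))) =
      acc ++ ks.map (fun k => (k, g k ++ [f k])) := by
  induction ks generalizing acc with
  | nil => simp
  | cons k ks ih =>
    obtain ⟨hk1, hk2⟩ := List.nodup_cons.1 hk
    simp only [List.foldl_cons, List.map_cons]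
    have hstep : pvAppendAt (acc ++ (k, g k) :: ks.map (fun k => (k, g k))) k (f k)
        = acc ++ (k, g k ++ [f k]) :: ks.map (fun k => (k, g k)) := by
      have hany : (acc ++ (k, g k) :: ks.map (fun k => (k, g k))).any (fun e => e.1 == k) = true := by
        rw [List.any_eq_true]
        exact ⟨(k, g k), by simp, by simp⟩
      rw [pvAppendAt, if_pos hany]
      rw [List.map_append, List.map_cons]
      congr 1
      · have h1 : acc.map (fun e => if e.1 == k then (e.1, e.2 ++ [f k]) else e) = acc.map id := by
          apply List.map_congr_left
          intro e he
          have : e.1 ≠ k := fun e2 => hacc e he (e2 ▸ List.mem_cons_self)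
          simp [this]
        rw [h1, List.map_id]
      · congr 1
        · simp
        · rw [List.map_map]
          apply List.map_congr_left
          intro k' hk'
          have : k' ≠ k := fun e2 => hk1 (e2 ▸ hk')
          simp [this]
    rw [hstep]
    have hacc' : ∀ e ∈ acc ++ [(k, g k ++ [f k])], e.1 ∉ ks := by
      intro e he hin
      rcases List.mem_append.1 he with h1 | h1
      · exact hacc e h1 (List.mem_cons_of_mem _ hin)
      · rw [List.mem_singleton] at h1
        subst h1
        exact hk1 hin
    have := ih (acc ++ [(k, g k ++ [f k])]) hk2 hacc'
    simpa using this

theorem pv_A_eq_colsOf (rows : List (List (String × Int))) (mv : Option Int) :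
    row_dicts_to_data rows mv = pvColsOf rows mv (all_keys rows) := by
  have hnd := pv_nodup_all_keys rows
  simp only [row_dicts_to_data]
  have hstep : (fun (data : List (String × List (Option Int))) (row : List (String × Int)) =>
      (all_keys rows).foldl (fun data col =>
        match row.find? (fun kv => kv.1 == col) with
        | some kv => pvAppendAt data col (some kv.2)
        | none => pvAppendAt data col mv) data)
      = (fun data row => (all_keys rows).foldl
          (fun d c => pvAppendAt d c (pvColVal row c mv)) data) := by
    funext data row
    congr 1
    funext d c
    simp only [pvColVal]
    cases row.find? (fun kv => kv.1 == c) <;> rfl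
  rw [hstep]
  have main : ∀ p : List (List (String × Int)),
      p.foldl (fun data row => (all_keys rows).foldl
          (fun d c => pvAppendAt d c (pvColVal row c mv)) data) []
        = if p = [] then [] else pvColsOf p mv (all_keys rows) := by
    intro p
    induction p using List.reverseRecOn with
    | nil => simp
    | append_singleton p row ih =>
      rw [List.foldl_append, List.foldl_cons, List.foldl_nil, ih]
      by_cases hp : p = []
      · subst hp
        rw [if_pos rfl, if_neg (by simp)]
        rw [pv_foldA_fresh (fun c => pvColVal row c mv) (all_keys rows) [] hnd (by simp)]
        simp [pvColsOf]
      · rw [if_neg hp, if_neg (by simp [hp])]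
        rw [show pvColsOf p mv (all_keys rows)
              = [] ++ (all_keys rows).map (fun k => (k, p.map (fun row => pvColVal row k mv)))
            from by simp [pvColsOf]]
        rw [pv_foldA_full (fun c => pvColVal row c mv)
              (fun k => p.map (fun row => pvColVal row k mv)) (all_keys rows) [] hnd (by simp)]
        simp [pvColsOf]
  rw [main rows]
  by_cases hr : rows = []
  · subst hr
    simp [pvColsOf, all_keys]
  · rw [if_neg hr]

-- B-side phase 1 (the items() loop of one row)
theorem pv_phase1 (mv : Option Int) (n : Nat) (q : List (String × Int)) (base : List String)
    (g : String → List (Option Int)) (hb : base.Nodup) (hq : (q.map Prod.fst).Nodup) :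
    q.foldl (fun data kv =>
        if data.any (fun e => e.1 == kv.1) then
          data.map (fun e => if e.1 == kv.1 then (e.1, e.2 ++ [some kv.2]) else e)
        else data ++ [(kv.1, List.replicate n mv ++ [some kv.2])])
      (base.map (fun k => (k, g k))) =
    (base ++ pvNewKeys q base).map (fun k =>
      (k, (if k ∈ base then g k else List.replicate n mv) ++
          (match q.find? (fun kv => kv.1 == k) with | some kv => [some kv.2] | none => []))) := by
  induction q generalizing base g with
  | nil =>
    simp only [List.foldl_nil, pvNewKeys, List.filterMap_nil, List.append_nil, List.find?_nil]
    apply List.map_congr_left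
    intro k hk
    simp [hk]
  | cons kv q ih =>
    rw [List.map_cons, List.nodup_cons] at hq
    obtain ⟨hk1, hq'⟩ := hq
    have hfindq : q.find? (fun kv' => kv'.1 == kv.1) = none := by
      rw [List.find?_eq_none]
      intro kv' hkv'
      simp only [beq_iff_eq]
      exact fun e => hk1 (e ▸ List.mem_map_of_mem hkv')
    simp only [List.foldl_cons]
    by_cases hm : kv.1 ∈ base
    · have hany : ((base.map (fun k => (k, g k))).any (fun e => e.1 == kv.1)) = true := by
        rw [List.any_eq_true]
        exact ⟨(kv.1, g kv.1), List.mem_map_of_mem hm, by simp⟩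
      rw [if_pos hany]
      have hmap : (base.map (fun k => (k, g k))).map
            (fun e => if e.1 == kv.1 then (e.1, e.2 ++ [some kv.2]) else e)
          = base.map (fun k => (k, (fun k' => if k' = kv.1 then g k' ++ [some kv.2] else g k') k)) := by
        rw [List.map_map]
        apply List.map_congr_left
        intro k _
        by_cases e : k = kv.1 <;> simp [e]
      rw [hmap, ih _ _ hb hq']
      have hkeys : pvNewKeys (kv :: q) base = pvNewKeys q base := by
        simp [pvNewKeys, hm]
      rw [hkeys]
      apply List.map_congr_left
      intro k hkmem
      by_cases ek : k = kv.1
      · subst ek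
        rw [if_pos rfl, if_pos hm, if_pos hm, hfindq]
        simp [List.find?_cons_of_pos]
      · rw [if_neg ek]
        have hhead : (kv :: q).find? (fun kv' => kv'.1 == k) = q.find? (fun kv' => kv'.1 == k) := by
          rw [List.find?_cons_of_neg]
          simp only [beq_iff_eq]
          exact fun e => ek e.symm
        rw [hhead]
    · have hany : ((base.map (fun k => (k, g k))).any (fun e => e.1 == kv.1)) = false := by
        rw [List.any_eq_false]
        intro e he
        obtain ⟨k', hk', rfl⟩ := List.mem_map.1 he
        simp only [beq_iff_eq]
        exact fun e2 => hm (e2 ▸ hk')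
      simp only [hany, Bool.false_eq_true, if_false]
      have hsnoc : base.map (fun k => (k, g k)) ++ [(kv.1, List.replicate n mv ++ [some kv.2])]
          = (base ++ [kv.1]).map (fun k =>
              (k, (fun k' => if k' = kv.1 then List.replicate n mv ++ [some kv.2] else g k') k)) := by
        rw [List.map_append]
        congr 1
        · apply List.map_congr_left
          intro k hkmem
          have : k ≠ kv.1 := fun e => hm (e ▸ hkmem)
          simp [this]
        · simp
      rw [hsnoc, ih _ _ (by
            rw [List.nodup_append]
            exact ⟨hb, List.nodup_singleton _,
              by intro a ha b hbm e; rw [List.mem_singleton] at hbm; exact hm ((e.trans hbm) ▸ ha)⟩)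
          hq']
      rw [pv_newKeys_snoc q base kv.1 hk1]
      have hkeys : base ++ pvNewKeys (kv :: q) base = (base ++ [kv.1]) ++ pvNewKeys q base := by
        simp [pvNewKeys, hm, List.append_assoc]
      rw [hkeys]
      apply List.map_congr_left
      intro k hkmem
      by_cases ek : k = kv.1
      · subst ek
        rw [if_pos (by simp), if_neg hm, hfindq]
        simp [List.find?_cons_of_pos]
      · have hhead : (kv :: q).find? (fun kv' => kv'.1 == k) = q.find? (fun kv' => kv'.1 == k) := by
          rw [List.find?_cons_of_neg]
          simp only [beq_iff_eq]
          exact fun e => ek e.symm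
        rw [hhead]
        have hmem' : k ∈ base ++ [kv.1] ↔ k ∈ base := by
          simp [List.mem_append, ek]
        by_cases hkb : k ∈ base
        · rw [if_pos (hmem'.2 hkb), if_pos hkb, if_neg ek]
        · rw [if_neg (fun h => hkb (hmem'.1 h)), if_neg hkb]

theorem pv_B_eq_colsOf (rows : List (List (String × Int))) (mv : Option Int)
    (h : ∀ row ∈ rows, (row.map Prod.fst).Nodup) :
    row_dicts_to_data_alt rows mv = pvColsOf rows mv (all_keys rows) := by
  have main : ∀ p : List (List (String × Int)), (∀ row ∈ p, (row.map Prod.fst).Nodup) →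
      p.foldl (fun (st : List (String × List (Option Int)) × Nat) row =>
        let data := row.foldl (fun data kv =>
          if data.any (fun e => e.1 == kv.1) then
            data.map (fun e => if e.1 == kv.1 then (e.1, e.2 ++ [some kv.2]) else e)
          else data ++ [(kv.1, List.replicate st.2 mv ++ [some kv.2])]) st.1
        let data2 := data.map (fun e =>
          if row.any (fun kv => kv.1 == e.1) then e else (e.1, e.2 ++ [mv]))
        (data2, st.2 + 1)) ([], 0)
      = (pvColsOf p mv (all_keys p), p.length) := by
    intro p hp
    induction p using List.reverseRecOn with
    | nil => simp [pvColsOf, all_keys]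
    | append_singleton p row ih =>
      rw [List.foldl_append, List.foldl_cons, List.foldl_nil,
        ih (fun r hr => hp r (List.mem_append.2 (Or.inl hr)))]
      have hb := pv_nodup_all_keys p
      have hrow := hp row (List.mem_append.2 (Or.inr (List.mem_singleton.2 rfl)))
      simp only [pvColsOf]
      rw [pv_phase1 mv p.length row (all_keys p)
            (fun k => p.map (fun r => pvColVal r k mv)) hb hrow]
      have hkeys : all_keys (p ++ [row]) = all_keys p ++ pvNewKeys row (all_keys p) := by
        simp only [all_keys, List.foldl_append, List.foldl_cons, List.foldl_nil]
        exact pv_insKeys_eq row _ hrow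
      rw [hkeys, List.map_map]
      have hrep : ∀ k, k ∉ all_keys p →
          p.map (fun r => pvColVal r k mv) = List.replicate p.length mv := by
        intro k hk
        have hall : ∀ r ∈ p, pvColVal r k mv = (fun _ => mv) r := by
          intro r hr
          apply pv_colVal_of_not_mem
          intro hmemk
          exact hk ((pv_mem_all_keys p k).2 ⟨r, hr, hmemk⟩)
        rw [List.map_congr_left hall, List.map_const']
      congr 1
      apply List.map_congr_left
      intro k hkmem
      simp only [Function.comp]
      by_cases hmem : k ∈ row.map Prod.fst
      · have hany : (row.any (fun kv => kv.1 == k)) = true := by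
          rw [List.any_eq_true]
          obtain ⟨kv, hkv, rfl⟩ := List.mem_map.1 hmem
          exact ⟨kv, hkv, by simp⟩
        rw [if_pos hany]
        cases hf : row.find? (fun kv => kv.1 == k) with
        | none =>
          rw [List.find?_eq_none] at hf
          obtain ⟨kv, hkv, rfl⟩ := List.mem_map.1 hmem
          exact absurd (by simp) (hf kv hkv)
        | some kv =>
          have hval : pvColVal row k mv = some kv.2 := by simp [pvColVal, hf]
          rw [List.map_append, List.map_cons, List.map_nil, hval]
          by_cases hkp : k ∈ all_keys p
          · rw [if_pos hkp]
          · rw [if_neg hkp, hrep k hkp]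
      · have hany : (row.any (fun kv => kv.1 == k)) = false := by
          rw [List.any_eq_false]
          intro kv hkv
          simp only [beq_iff_eq]
          exact fun e => hmem (e ▸ List.mem_map_of_mem hkv)
        simp only [hany, Bool.false_eq_true, if_false]
        have hf : row.find? (fun kv => kv.1 == k) = none := by
          rw [List.find?_eq_none]
          intro kv hkv
          simp only [beq_iff_eq]
          exact fun e => hmem (e ▸ List.mem_map_of_mem hkv)
        have hval : pvColVal row k mv = mv := pv_colVal_of_not_mem row k mv hmem
        rw [List.map_append, List.map_cons, List.map_nil, hval, hf]
        have hkp : k ∈ all_keys p := by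
          rcases List.mem_append.1 hkmem with h1 | h1
          · exact h1
          · exact absurd (pv_mem_pvNewKeys row _ k h1).1 hmem
        rw [if_pos hkp]
        simp
      simp
  unfold row_dicts_to_data_alt
  rw [main rows h]

-- ===== VERDICT (by name: the statement is the Claim_ definition above) =====
theorem row_dicts_to_data_spec : Claim_equal_row_dicts_to_data := by
  intro rows mv _ hpre
  unfold Spec_row_dicts_to_data
  rw [pv_A_eq_colsOf, pv_B_eq_colsOf rows mv hpre]
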